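-- pv_equiv track=rewrite | github.com/lin72h/gcdx | scripts/benchmarks/extract-m14-benchmark.py | capability_flags
-- ===== SOURCE A (Python) =====
-- from typing import Any
--
-- def capability_flags(
--     full_run_metrics: dict[str, Any],
--     steady_state_metrics: dict[str, Any],
-- ) -> dict[str, bool]:
--     full_keys = set(full_run_metrics)
--     steady_keys = set(steady_state_metrics)
--     return {
--         "full_run_dispatch_metrics": any(key.startswith("dispatch_") for key in full_keys),
--         "full_run_worker_metrics": any(key.startswith("worker_") for key in full_keys),
--         "steady_state_dispatch_metrics": any(key.startswith("dispatch_") for key in steady_keys),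
--         "steady_state_worker_metrics": any(key.startswith("worker_") for key in steady_keys),
--     }
-- ===== SOURCE B (Python) =====
-- def _sorted_prefix_flag(sorted_keys, prefix):
--     # binary search (bisect_left by hand) for the first key >= prefix; keys with
--     # the prefix, if any, form a contiguous block starting exactly there.
--     lo, hi = 0, len(sorted_keys)
--     while lo < hi:
--         mid = (lo + hi) // 2
--         if sorted_keys[mid] < prefix:
--             lo = mid + 1
--         else:
--             hi = mid
--     return lo < len(sorted_keys) and sorted_keys[lo].startswith(prefix)
--
--
-- def capability_flags(full_run_metrics, steady_state_metrics):
--     full_sorted = sorted(full_run_metrics)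
--     steady_sorted = sorted(steady_state_metrics)
--     return {
--         "full_run_dispatch_metrics": _sorted_prefix_flag(full_sorted, "dispatch_"),
--         "full_run_worker_metrics": _sorted_prefix_flag(full_sorted, "worker_"),
--         "steady_state_dispatch_metrics": _sorted_prefix_flag(steady_sorted, "dispatch_"),
--         "steady_state_worker_metrics": _sorted_prefix_flag(steady_sorted, "worker_"),
--     }
-- ===== Notes on version B (the rewrite author's own statement) =====
-- stated objective: alternative
-- what changed: Instead of linearly scanning each dict's keys with four any() generator passes over set() copies, B sorts each dict's keys once and answers each prefix question by a hand-written binary search (bisect_left) for the first key >= the prefix, using that keys sharing a prefix form a contiguous block of the sorted order starting exactly there.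
import Mathlib
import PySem

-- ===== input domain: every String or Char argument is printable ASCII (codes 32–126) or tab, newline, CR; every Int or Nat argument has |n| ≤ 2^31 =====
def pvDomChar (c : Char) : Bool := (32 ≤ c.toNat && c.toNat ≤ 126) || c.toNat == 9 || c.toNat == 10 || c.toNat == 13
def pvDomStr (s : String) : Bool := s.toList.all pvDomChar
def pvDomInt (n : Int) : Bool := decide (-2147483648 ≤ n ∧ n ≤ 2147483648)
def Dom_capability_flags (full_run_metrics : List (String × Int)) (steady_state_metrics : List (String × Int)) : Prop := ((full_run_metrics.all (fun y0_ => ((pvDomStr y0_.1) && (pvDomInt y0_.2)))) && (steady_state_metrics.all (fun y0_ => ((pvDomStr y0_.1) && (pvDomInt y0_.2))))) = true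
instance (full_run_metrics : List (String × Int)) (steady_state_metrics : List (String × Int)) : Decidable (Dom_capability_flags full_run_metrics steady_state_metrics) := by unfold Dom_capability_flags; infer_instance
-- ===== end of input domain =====

-- B is an alternative algorithm: it sorts each dict's keys once and answers each prefix
-- question by a hand-written binary search for the first key >= the prefix (keys sharing a
-- prefix form a contiguous block of the sorted order starting there), instead of A's four
-- independent any() scans over set() copies.

-- ===== PORT A =====
def capability_flags (full_run_metrics : List (String × Int)) (steady_state_metrics : List (String × Int)) : List (String × Bool) :=
  let full_keys : PySem.Set String := PySem.Set.ofList (full_run_metrics.map Prod.fst)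
  let steady_keys : PySem.Set String := PySem.Set.ofList (steady_state_metrics.map Prod.fst)
  [ ("full_run_dispatch_metrics", full_keys.any (fun key => PySem.Str.startswith key "dispatch_")),
    ("full_run_worker_metrics", full_keys.any (fun key => PySem.Str.startswith key "worker_")),
    ("steady_state_dispatch_metrics", steady_keys.any (fun key => PySem.Str.startswith key "dispatch_")),
    ("steady_state_worker_metrics", steady_keys.any (fun key => PySem.Str.startswith key "worker_")) ]

-- ===== PORT B =====
-- Source B's hand-written bisect_left loop (lo, hi stay in 0..len throughout, so Nat with
-- Nat division transcribes Python's nonnegative ints and '//' exactly)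
def bisLoop (sorted_keys : List String) (pfx : String) (lo hi : Nat) : Nat :=
  if lo < hi then
    let mid := (lo + hi) / 2
    if sorted_keys.getD mid "" < pfx then bisLoop sorted_keys pfx (mid + 1) hi
    else bisLoop sorted_keys pfx lo mid
  else lo
termination_by hi - lo
decreasing_by all_goals omega

-- Source B's _sorted_prefix_flag: bisect, then test the single candidate key
def sortedPrefixFlag (sorted_keys : List String) (pfx : String) : Bool :=
  let lo := bisLoop sorted_keys pfx 0 sorted_keys.length
  if lo < sorted_keys.length then PySem.Str.startswith (sorted_keys.getD lo "") pfx else false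

def capability_flags_alt (full_run_metrics : List (String × Int)) (steady_state_metrics : List (String × Int)) : List (String × Bool) :=
  let full_sorted := PySem.List.sorted (full_run_metrics.map Prod.fst) (fun x => x) false
  let steady_sorted := PySem.List.sorted (steady_state_metrics.map Prod.fst) (fun x => x) false
  [ ("full_run_dispatch_metrics", sortedPrefixFlag full_sorted "dispatch_"),
    ("full_run_worker_metrics", sortedPrefixFlag full_sorted "worker_"),
    ("steady_state_dispatch_metrics", sortedPrefixFlag steady_sorted "dispatch_"),
    ("steady_state_worker_metrics", sortedPrefixFlag steady_sorted "worker_") ]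

-- ===== PRECONDITION & SPEC =====
def Spec_capability_flags (full_run_metrics : List (String × Int)) (steady_state_metrics : List (String × Int)) (out : List (String × Bool)) : Prop := out = capability_flags_alt full_run_metrics steady_state_metrics
instance (full_run_metrics : List (String × Int)) (steady_state_metrics : List (String × Int)) (out : List (String × Bool)) : Decidable (Spec_capability_flags full_run_metrics steady_state_metrics out) := by unfold Spec_capability_flags; infer_instance

-- ===== CLAIM (what is proved, stated in full; the proofs are below) =====
def Claim_equal_capability_flags : Prop := ∀ (full_run_metrics : List (String × Int)) (steady_state_metrics : List (String × Int)), Dom_capability_flags full_run_metrics steady_state_metrics → Spec_capability_flags full_run_metrics steady_state_metrics (capability_flags full_run_metrics steady_state_metrics)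

-- ===== LEMMAS AND PROOFS =====

-- any over set(xs) equals any over xs
theorem any_ofList (l : List String) (p : String → Bool) :
    (PySem.Set.ofList l).any p = l.any p := by
  by_cases h : l.any p = true
  · rw [h]
    rw [List.any_eq_true] at h ⊢
    obtain ⟨x, hx, hp⟩ := h
    exact ⟨x, (PySem.Set.mem_ofList l x).2 hx, hp⟩
  · rw [Bool.not_eq_true] at h
    rw [h]
    rw [List.any_eq_false] at h ⊢
    intro x hx
    exact h x ((PySem.Set.mem_ofList l x).1 hx)

-- in the lexicographic order no extension of p precedes p
theorem not_append_lt_chars (p t : List Char) : ¬ (p ++ t < p) := by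
  induction p with
  | nil => exact List.not_lt_nil t
  | cons a p' ih =>
    intro h
    rcases (List.cons_lt_cons_iff).1 h with hlt | ⟨_, hlt⟩
    · exact lt_irrefl a hlt
    · exact ih hlt

-- a list between a prefix p and an extension of p is itself an extension of p
theorem sandwich_chars : ∀ (p m t2 : List Char), ¬ m < p → ¬ (p ++ t2 < m) → ∃ t1, m = p ++ t1 := by
  intro p
  induction p with
  | nil => intro m _ _ _; exact ⟨m, rfl⟩
  | cons a p' ih =>
    intro m t2 h1 h2
    cases m with
    | nil => exact absurd (List.nil_lt_cons a p') h1
    | cons b m' =>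
      rcases lt_trichotomy a b with hab | hab | hab
      · exact absurd ((List.cons_lt_cons_iff).2 (Or.inl hab)) h2
      · subst hab
        have hm : ¬ m' < p' := fun h => h1 ((List.cons_lt_cons_iff).2 (Or.inr ⟨rfl, h⟩))
        have hk : ¬ (p' ++ t2 < m') := fun h => h2 ((List.cons_lt_cons_iff).2 (Or.inr ⟨rfl, h⟩))
        obtain ⟨t1, ht1⟩ := ih m' t2 hm hk
        exact ⟨t1, by rw [ht1]; rfl⟩
      · exact absurd ((List.cons_lt_cons_iff).2 (Or.inl hab)) h1

-- a string starting with p is >= p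
theorem startswith_le (k p : String) (h : PySem.Str.startswith k p = true) : p ≤ k := by
  rw [PySem.Str.startswith_eq, PySem.Chars.startswith_iff] at h
  obtain ⟨t, ht⟩ := h
  rw [← not_lt, String.lt_iff_toList_lt, ← ht]
  exact not_append_lt_chars p.toList t

-- a string between p and a string starting with p starts with p itself
theorem startswith_sandwich (k m p : String) (hk : PySem.Str.startswith k p = true)
    (h1 : p ≤ m) (h2 : m ≤ k) : PySem.Str.startswith m p = true := by
  rw [PySem.Str.startswith_eq, PySem.Chars.startswith_iff] at hk ⊢
  obtain ⟨t2, ht2⟩ := hk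
  have h1' : ¬ m.toList < p.toList := by
    rw [← String.lt_iff_toList_lt]; exact not_lt.2 h1
  have h2' : ¬ (p.toList ++ t2 < m.toList) := by
    rw [ht2, ← String.lt_iff_toList_lt]; exact not_lt.2 h2
  obtain ⟨t1, ht1⟩ := sandwich_chars p.toList m.toList t2 h1' h2'
  exact ⟨t1, ht1.symm⟩

-- sorted lists are monotone under getD inside the length
theorem getD_mono (S : List String) (hs : S.Pairwise (· ≤ ·)) (i j : Nat)
    (hij : i ≤ j) (hj : j < S.length) : S.getD i "" ≤ S.getD j "" := by
  rcases Nat.lt_or_ge i j with hlt | hge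
  · rw [List.getD_eq_getElem S "" (lt_trans hlt hj), List.getD_eq_getElem S "" hj]
    exact (List.pairwise_iff_getElem.1 hs) i j _ _ hlt
  · have : i = j := le_antisymm hij hge
    rw [this]

-- binary-search invariant: bisLoop returns the boundary between keys < pfx and keys >= pfx
theorem bisLoop_inv (S : List String) (pfx : String) (hs : S.Pairwise (· ≤ ·)) :
    ∀ lo hi, lo ≤ hi → hi ≤ S.length →
    (∀ j, j < lo → S.getD j "" < pfx) → (∀ j, hi ≤ j → j < S.length → pfx ≤ S.getD j "") →
    lo ≤ bisLoop S pfx lo hi ∧ bisLoop S pfx lo hi ≤ hi ∧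
    (∀ j, j < bisLoop S pfx lo hi → S.getD j "" < pfx) ∧
    (∀ j, bisLoop S pfx lo hi ≤ j → j < S.length → pfx ≤ S.getD j "") := by
  intro lo hi
  induction lo, hi using bisLoop.induct S pfx with
  | case1 lo hi hlt mid hcmp ih =>
    intro _ hhi hlo hhi'
    rw [bisLoop, if_pos hlt, if_pos hcmp]
    have hmid : lo ≤ (lo + hi) / 2 ∧ (lo + hi) / 2 < hi := by omega
    have h1 : ∀ j, j < mid + 1 → S.getD j "" < pfx := by
      intro j hj
      exact lt_of_le_of_lt (getD_mono S hs j mid (by omega) (by omega)) hcmp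
    obtain ⟨a, b, c, d⟩ := ih (by omega) hhi h1 hhi'
    exact ⟨le_trans (by omega : lo ≤ mid + 1) a, b, c, d⟩
  | case2 lo hi hlt mid hcmp ih =>
    intro hle hhi hlo hhi'
    rw [bisLoop, if_pos hlt, if_neg hcmp]
    have hmid : lo ≤ (lo + hi) / 2 ∧ (lo + hi) / 2 < hi := by omega
    have h2 : ∀ j, mid ≤ j → j < S.length → pfx ≤ S.getD j "" := by
      intro j hj hjl
      exact le_trans (not_lt.1 hcmp) (getD_mono S hs mid j hj hjl)
    obtain ⟨a, b, c, d⟩ := ih (by omega) (by omega) hlo h2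
    exact ⟨a, le_trans b (by omega : mid ≤ hi), c, d⟩
  | case3 lo hi hlt =>
    intro hle hhi hlo hhi'
    rw [bisLoop, if_neg hlt]
    exact ⟨le_refl lo, hle, hlo, fun j hj hjl => hhi' j (by omega) hjl⟩

-- the bisect-based flag on the sorted keys equals the linear any-scan on the raw keys
theorem flag_eq (keys : List String) (pfx : String) :
    sortedPrefixFlag (PySem.List.sorted keys (fun x => x) false) pfx
      = keys.any (fun k => PySem.Str.startswith k pfx) := by
  set S := PySem.List.sorted keys (fun x => x) false with hS
  have hs : S.Pairwise (· ≤ ·) := by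
    have := PySem.List.sorted_pairwise (xs := keys) (key := fun x => x)
    simpa using this
  have hmem : ∀ k, k ∈ S ↔ k ∈ keys := by
    intro k; rw [hS, PySem.List.mem_sorted]
  obtain ⟨h0, h1, hlt, hge⟩ := bisLoop_inv S pfx hs 0 S.length (by omega) (le_refl _)
    (by intro j hj; omega) (by intro j hj hjl; omega)
  set i := bisLoop S pfx 0 S.length with hi
  have hflag : sortedPrefixFlag S pfx
      = if i < S.length then PySem.Str.startswith (S.getD i "") pfx else false := rfl
  rw [hflag]
  by_cases hany : keys.any (fun k => PySem.Str.startswith k pfx) = true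
  · rw [hany]
    obtain ⟨k, hk, hsw⟩ := List.any_eq_true.1 hany
    obtain ⟨j, hj, hje⟩ := List.getElem_of_mem ((hmem k).2 hk)
    have hkD : S.getD j "" = k := by rw [List.getD_eq_getElem S "" hj, hje]
    have hpk : pfx ≤ S.getD j "" := by rw [hkD]; exact startswith_le k pfx hsw
    have hij : i ≤ j := by
      by_contra hc
      exact absurd (lt_of_le_of_lt hpk (hlt j (by omega))) (lt_irrefl pfx)
    have hilen : i < S.length := lt_of_le_of_lt hij hj
    rw [if_pos hilen]
    exact startswith_sandwich k (S.getD i "") pfx hsw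
      (hge i (le_refl i) hilen) (hkD ▸ getD_mono S hs i j hij hj)
  · rw [Bool.not_eq_true] at hany
    rw [hany]
    split_ifs with hilen
    · have : S.getD i "" ∈ keys := by
        apply (hmem _).1
        rw [List.getD_eq_getElem S "" hilen]
        exact List.getElem_mem hilen
      exact Bool.eq_false_iff.mpr ((List.any_eq_false.1 hany) _ this)
    · rfl

-- ===== VERDICT (by name: the statement is the Claim_ definition above) =====
theorem capability_flags_spec : Claim_equal_capability_flags := by
  intro full steady _
  unfold Spec_capability_flags capability_flags capability_flags_alt
  simp only [flag_eq, any_ofList]
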